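-- pv_equiv track=rewrite | github.com/zhanglijun95/SF-ActiveDomainAdaptation | src/methods/daod_method.py | _required_feature_bundles
-- ===== SOURCE A (Python) =====
-- def _required_feature_bundles(signal_names: list[str]) -> set[str]:
--     """Map configured signal names to the feature bundles they need."""
--
--     bundles: set[str] = set()
--     for name in signal_names:
--         if name == "latent_query_count":
--             bundles.add("latent")
--         elif name.startswith("coverage_gap_") or name == "supported_latent_count":
--             bundles.add("coverage_gap")
--         elif name.startswith("class_rarity_"):
--             bundles.add("class_rarity")
--         elif name.startswith("teacher_student_disagreement_"):
--             bundles.add("teacher_student")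
--         elif name.startswith("teacher_student_"):
--             bundles.add("teacher_student")
--         elif name.startswith("semantic_"):
--             bundles.add("semantic")
--         elif name.startswith("semantic_ambiguity_"):
--             bundles.add("semantic")
--         elif name.startswith("geometry_"):
--             bundles.add("geometry")
--         elif name.startswith("geometry_instability_"):
--             bundles.add("geometry")
--         elif name.startswith("cross_view_"):
--             bundles.add("cross_view")
--         elif name.startswith("cross_view_inconsistency_"):
--             bundles.add("cross_view")
--         elif name.startswith("confident_"):
--             bundles.add("confident")
--         else:
--             raise KeyError(
--                 f"Cannot infer feature bundle for signal '{name}'. "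
--                 "Add an explicit bundle mapping before using this signal."
--             )
--     return bundles
-- ===== SOURCE B (Python) =====
-- _EXACT = {"latent_query_count": "latent", "supported_latent_count": "coverage_gap"}
-- _ONE_WORD = {"semantic", "geometry", "confident"}
-- _TWO_WORD = {"coverage_gap", "class_rarity", "teacher_student", "cross_view"}
--
--
-- def _required_feature_bundles(signal_names: list[str]) -> set[str]:
--     """Map configured signal names to the feature bundles they need."""
--     bundles: set[str] = set()
--     for name in signal_names:
--         if name in _EXACT:
--             bundles.add(_EXACT[name])
--             continue
--         parts = name.split("_")
--         if len(parts) >= 2 and parts[0] in _ONE_WORD: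
--             bundles.add(parts[0])
--         elif len(parts) >= 3 and parts[0] + "_" + parts[1] in _TWO_WORD:
--             bundles.add(parts[0] + "_" + parts[1])
--         else:
--             raise KeyError(
--                 f"Cannot infer feature bundle for signal '{name}'. "
--                 "Add an explicit bundle mapping before using this signal."
--             )
--     return bundles
-- ===== Notes on version B (the rewrite author's own statement) =====
-- stated objective: alternative
-- what changed: Instead of scanning a chain of startswith tests per name, B tokenizes each name on '_' and classifies it by hash-set lookup of its first one or two tokens (with a two-entry dict for the exact-name aliases), raising the same KeyError when no lookup hits.
import Mathlib
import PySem

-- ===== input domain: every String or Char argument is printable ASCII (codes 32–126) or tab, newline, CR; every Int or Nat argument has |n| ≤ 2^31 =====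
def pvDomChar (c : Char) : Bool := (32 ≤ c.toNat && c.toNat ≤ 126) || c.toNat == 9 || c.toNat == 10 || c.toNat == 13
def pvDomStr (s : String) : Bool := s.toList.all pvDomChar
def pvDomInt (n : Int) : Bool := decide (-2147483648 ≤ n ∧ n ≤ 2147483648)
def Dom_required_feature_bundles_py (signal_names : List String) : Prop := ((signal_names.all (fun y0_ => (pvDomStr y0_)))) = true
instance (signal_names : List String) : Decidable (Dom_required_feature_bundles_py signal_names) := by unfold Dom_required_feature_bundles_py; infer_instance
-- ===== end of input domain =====

-- B tokenizes each name on '_' and classifies it by set/dict lookup of its leading tokens,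
-- instead of A's chain of startswith tests (alternative decomposition, same cost).

-- ===== PORT A =====
-- Step of A's loop body: the if/elif chain. The final 'else' raises KeyError;
-- Pre_ excludes such inputs, so the port leaves the accumulator unchanged there.
def pvStepA (bundles : PySem.Set String) (name : String) : PySem.Set String :=
  if name == "latent_query_count" then PySem.Set.add bundles "latent"
  else if PySem.Str.startswith name "coverage_gap_" || name == "supported_latent_count" then PySem.Set.add bundles "coverage_gap"
  else if PySem.Str.startswith name "class_rarity_" then PySem.Set.add bundles "class_rarity"
  else if PySem.Str.startswith name "teacher_student_disagreement_" then PySem.Set.add bundles "teacher_student"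
  else if PySem.Str.startswith name "teacher_student_" then PySem.Set.add bundles "teacher_student"
  else if PySem.Str.startswith name "semantic_" then PySem.Set.add bundles "semantic"
  else if PySem.Str.startswith name "semantic_ambiguity_" then PySem.Set.add bundles "semantic"
  else if PySem.Str.startswith name "geometry_" then PySem.Set.add bundles "geometry"
  else if PySem.Str.startswith name "geometry_instability_" then PySem.Set.add bundles "geometry"
  else if PySem.Str.startswith name "cross_view_" then PySem.Set.add bundles "cross_view"
  else if PySem.Str.startswith name "cross_view_inconsistency_" then PySem.Set.add bundles "cross_view"
  else if PySem.Str.startswith name "confident_" then PySem.Set.add bundles "confident"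
  else bundles  -- Python: raise KeyError (excluded by Pre_)

def required_feature_bundles_py (signal_names : List String) : List String :=
  signal_names.foldl pvStepA PySem.Set.empty

-- ===== PORT B =====
-- _EXACT, _ONE_WORD, _TWO_WORD of Source B
def pvExact : PySem.Dict String String :=
  (PySem.Dict.empty.insert "latent_query_count" "latent").insert "supported_latent_count" "coverage_gap"
def pvOneWord : PySem.Set String := PySem.Set.ofList ["semantic", "geometry", "confident"]
def pvTwoWord : PySem.Set String := PySem.Set.ofList ["coverage_gap", "class_rarity", "teacher_student", "cross_view"]

-- loop body of Source B: exact-alias dict hit, else tokenize on "_" and look the leading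
-- token(s) up; no hit → KeyError (excluded by Pre_)
def pvStepB (bundles : PySem.Set String) (name : String) : PySem.Set String :=
  match PySem.Dict.get? pvExact name with
  | some b => PySem.Set.add bundles b
  | none =>
    -- name.split("_"): the separator "_" is non-empty, so split? is always `some`
    let parts : List String := (PySem.Str.split? name "_").getD []
    if 2 ≤ parts.length ∧ parts.getD 0 "" ∈ pvOneWord then
      PySem.Set.add bundles (parts.getD 0 "")
    else if 3 ≤ parts.length ∧ (parts.getD 0 "" ++ "_" ++ parts.getD 1 "") ∈ pvTwoWord then
      PySem.Set.add bundles (parts.getD 0 "" ++ "_" ++ parts.getD 1 "")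
    else bundles  -- Python: raise KeyError (excluded by Pre_)

def required_feature_bundles_py_alt (signal_names : List String) : List String :=
  signal_names.foldl pvStepB PySem.Set.empty

-- ===== PRECONDITION & SPEC =====
-- Pre_ excludes exactly the inputs on which A raises KeyError: a name matched by no branch.
def Pre_required_feature_bundles_py (signal_names : List String) : Prop :=
  ∀ name ∈ signal_names,
    name = "latent_query_count" ∨ name = "supported_latent_count" ∨
    PySem.Str.startswith name "coverage_gap_" = true ∨
    PySem.Str.startswith name "class_rarity_" = true ∨
    PySem.Str.startswith name "teacher_student_" = true ∨
    PySem.Str.startswith name "semantic_" = true ∨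
    PySem.Str.startswith name "geometry_" = true ∨
    PySem.Str.startswith name "cross_view_" = true ∨
    PySem.Str.startswith name "confident_" = true
instance (signal_names : List String) : Decidable (Pre_required_feature_bundles_py signal_names) := by
  unfold Pre_required_feature_bundles_py; infer_instance

def pvWitness_required_feature_bundles_py : List String :=
  ["latent_query_count", "coverage_gap_mean", "confident_ratio"]

def Spec_required_feature_bundles_py (signal_names : List String) (out : List String) : Prop := out = required_feature_bundles_py_alt signal_names
instance (signal_names : List String) (out : List String) : Decidable (Spec_required_feature_bundles_py signal_names out) := by unfold Spec_required_feature_bundles_py; infer_instance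

-- ===== CLAIM (what is proved, stated in full; the proofs are below) =====
def Claim_equal_required_feature_bundles_py : Prop := ∀ (signal_names : List String), Dom_required_feature_bundles_py signal_names → Pre_required_feature_bundles_py signal_names → Spec_required_feature_bundles_py signal_names (required_feature_bundles_py signal_names)

-- ===== LEMMAS AND PROOFS =====

-- structural model of Python's str.split("_") on char lists
def pvSplitU : List Char → List (List Char)
  | [] => [[]]
  | c :: t =>
    if c = '_' then [] :: pvSplitU t
    else
      match pvSplitU t with
      | h :: ts => (c :: h) :: ts
      | [] => [[c]]

def pvConsHead (pre : List Char) : List (List Char) → List (List Char)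
  | h :: ts => (pre ++ h) :: ts
  | [] => [pre]

lemma pvSplitU_ne_nil (l : List Char) : pvSplitU l ≠ [] := by
  cases l with
  | nil => simp [pvSplitU]
  | cons c t =>
    simp only [pvSplitU]
    split_ifs
    · simp
    · cases h : pvSplitU t <;> simp

lemma pvConsHead_consHead (p : List Char) (c : Char) (x : List (List Char)) :
    pvConsHead p (pvConsHead [c] x) = pvConsHead (p ++ [c]) x := by
  cases x <;> simp [pvConsHead]

lemma go_eq (fuel : Nat) (l cur : List Char) (acc : List (List Char)) (h : l.length < fuel) :
    PySem.Chars.splitOn.go ['_'] fuel l cur acc = acc.reverse ++ pvConsHead cur.reverse (pvSplitU l) := by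
  induction fuel generalizing l cur acc with
  | zero => omega
  | succ fuel ih =>
    cases l with
    | nil => simp [PySem.Chars.splitOn.go, pvSplitU, pvConsHead]
    | cons c rest =>
      by_cases hc : c = '_'
      · subst hc
        have hpre : List.isPrefixOf ['_'] ('_' :: rest) = true := by simp [List.isPrefixOf]
        rw [PySem.Chars.splitOn.go, if_pos hpre]
        simp only [List.length_singleton, List.drop_succ_cons, List.drop_zero]
        rw [ih rest [] (cur.reverse :: acc) (by simpa using Nat.lt_of_succ_lt_succ h)]
        cases hx : pvSplitU rest with
        | nil => exact absurd hx (pvSplitU_ne_nil rest)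
        | cons hd tl => simp [pvSplitU, pvConsHead, hx]
      · have hpre : List.isPrefixOf ['_'] (c :: rest) = false := by
          simp [List.isPrefixOf]; exact fun h => absurd h.symm hc
        rw [PySem.Chars.splitOn.go, if_neg (by simp [hpre])]
        rw [ih rest (c :: cur) acc (by simpa using Nat.lt_of_succ_lt_succ h)]
        have : pvSplitU (c :: rest) = pvConsHead [c] (pvSplitU rest) := by
          cases hx : pvSplitU rest <;> simp [pvSplitU, hc, hx, pvConsHead]
        rw [this, pvConsHead_consHead]
        simp

lemma splitOn_eq (l : List Char) : PySem.Chars.splitOn l ['_'] = pvSplitU l := by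
  rw [PySem.Chars.splitOn, go_eq l.length.succ l [] [] (Nat.lt_succ_self _)]
  cases hx : pvSplitU l with
  | nil => exact absurd hx (pvSplitU_ne_nil l)
  | cons hd tl => simp [pvConsHead]

lemma split?_eq (name : String) :
    PySem.Str.split? name "_" = some ((pvSplitU name.toList).map String.ofList) := by
  simp [PySem.Str.split?, PySem.Chars.split?, splitOn_eq]

-- splitting at the first separator
lemma pvSplitU_append (a b : List Char) (ha : '_' ∉ a) :
    pvSplitU (a ++ '_' :: b) = a :: pvSplitU b := by
  induction a with
  | nil => simp [pvSplitU]
  | cons c t ih =>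
    simp only [List.mem_cons, not_or] at ha
    have hc : ¬ c = '_' := fun h => ha.1 h.symm
    simp [pvSplitU, hc, ih ha.2]

def pvUnsplit : List (List Char) → List Char
  | [] => []
  | [x] => x
  | x :: y :: xs => x ++ '_' :: pvUnsplit (y :: xs)

lemma pvUnsplit_splitU (l : List Char) : pvUnsplit (pvSplitU l) = l := by
  induction l with
  | nil => rfl
  | cons c t ih =>
    by_cases hc : c = '_'
    · subst hc
      cases hx : pvSplitU t with
      | nil => exact absurd hx (pvSplitU_ne_nil t)
      | cons hd tl => simp_all [pvSplitU, pvUnsplit]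
    · cases hx : pvSplitU t with
      | nil => exact absurd hx (pvSplitU_ne_nil t)
      | cons hd tl =>
        cases tl with
        | nil => simp_all [pvSplitU, pvUnsplit]
        | cons hd2 tl2 => simp_all [pvSplitU, pvUnsplit]

-- from a startswith fact to the split shape
lemma startswith_elim (name p : String) (h : PySem.Str.startswith name p = true) :
    ∃ t, name.toList = p.toList ++ t := by
  rw [PySem.Str.startswith_eq, PySem.Chars.startswith_iff] at h
  obtain ⟨t, ht⟩ := h
  exact ⟨t, ht.symm⟩

-- from a split shape back to a startswith fact
lemma startswith_intro (name p : String) (x : List Char) (h : name.toList = p.toList ++ x) :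
    PySem.Str.startswith name p = true := by
  rw [PySem.Str.startswith_eq, PySem.Chars.startswith_iff]
  exact ⟨x, h.symm⟩

-- a longer prefix implies the shorter one
lemma startswith_trans {name p q : String} (h : PySem.Str.startswith name p = true)
    (hpq : q.toList <+: p.toList) : PySem.Str.startswith name q = true := by
  simp only [PySem.Str.startswith_eq, PySem.Chars.startswith_iff] at h ⊢
  exact hpq.trans h

lemma exact_none (name : String) (h1 : name ≠ "latent_query_count")
    (h2 : name ≠ "supported_latent_count") : PySem.Dict.get? pvExact name = none := by
  have e1 : ("latent_query_count" == name) = false := beq_eq_false_iff_ne.mpr (Ne.symm h1)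
  have e2 : ("supported_latent_count" == name) = false := beq_eq_false_iff_ne.mpr (Ne.symm h2)
  simp [pvExact, PySem.Dict.get?, PySem.Dict.insert, PySem.Dict.contains, PySem.Dict.empty,
    List.find?, e1, e2]

-- B's step when the name splits as <w>_<rest> with w a one-word bundle
lemma stepB_one (bundles : PySem.Set String) (name w : String)
    (h1 : name ≠ "latent_query_count") (h2 : name ≠ "supported_latent_count")
    (hw : '_' ∉ w.toList) (hmem : w ∈ pvOneWord) (t : List Char)
    (ht : name.toList = w.toList ++ '_' :: t) :
    pvStepB bundles name = PySem.Set.add bundles w := by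
  unfold pvStepB
  rw [exact_none name h1 h2]
  simp only [split?_eq, Option.getD_some, ht, pvSplitU_append _ _ hw]
  obtain ⟨r0, rs, hr⟩ := List.exists_cons_of_ne_nil (pvSplitU_ne_nil t)
  rw [hr]
  rw [if_pos]
  · simp
  · refine ⟨by simp, ?_⟩
    simpa using hmem

-- B's step when the name splits as <w1>_<w2>_<rest> with w1_w2 a two-word bundle
lemma stepB_two (bundles : PySem.Set String) (name w1 w2 w12 : String)
    (h1 : name ≠ "latent_query_count") (h2 : name ≠ "supported_latent_count")
    (hw1 : '_' ∉ w1.toList) (hw2 : '_' ∉ w2.toList)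
    (hone : w1 ∉ pvOneWord) (hw12 : w1 ++ "_" ++ w2 = w12) (htwo : w12 ∈ pvTwoWord)
    (t : List Char)
    (ht : name.toList = w1.toList ++ '_' :: (w2.toList ++ '_' :: t)) :
    pvStepB bundles name = PySem.Set.add bundles w12 := by
  unfold pvStepB
  rw [exact_none name h1 h2]
  simp only [split?_eq, Option.getD_some, ht, pvSplitU_append _ _ hw1, pvSplitU_append _ _ hw2]
  obtain ⟨r0, rs, hr⟩ := List.exists_cons_of_ne_nil (pvSplitU_ne_nil t)
  rw [hr]
  rw [if_neg, if_pos]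
  · simp [hw12]
  · refine ⟨by simp, ?_⟩
    simpa [hw12] using htwo
  · rintro ⟨-, hm⟩
    exact hone (by simpa using hm)

lemma mem_pvOneWord (w : String) (h : w ∈ pvOneWord) :
    w = "semantic" ∨ w = "geometry" ∨ w = "confident" := by
  simpa [pvOneWord, PySem.Set.ofList] using h

lemma mem_pvTwoWord (w : String) (h : w ∈ pvTwoWord) :
    w = "coverage_gap" ∨ w = "class_rarity" ∨ w = "teacher_student" ∨ w = "cross_view" := by
  simpa [pvTwoWord, PySem.Set.ofList] using h

-- B's step when no bundle matches: both lookups miss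
lemma stepB_none (bundles : PySem.Set String) (name : String)
    (h1 : name ≠ "latent_query_count") (h2 : name ≠ "supported_latent_count")
    (hcov : PySem.Str.startswith name "coverage_gap_" = false)
    (hcls : PySem.Str.startswith name "class_rarity_" = false)
    (hts : PySem.Str.startswith name "teacher_student_" = false)
    (hsem : PySem.Str.startswith name "semantic_" = false)
    (hgeo : PySem.Str.startswith name "geometry_" = false)
    (hcv : PySem.Str.startswith name "cross_view_" = false)
    (hconf : PySem.Str.startswith name "confident_" = false) :
    pvStepB bundles name = bundles := by
  unfold pvStepB
  rw [exact_none name h1 h2]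
  simp only [split?_eq, Option.getD_some]
  have hrecomp := pvUnsplit_splitU name.toList
  rw [if_neg, if_neg]
  · rintro ⟨hlen, hm⟩
    match hsp : pvSplitU name.toList with
    | [] => exact pvSplitU_ne_nil _ hsp
    | [p0] => rw [hsp] at hlen; simp at hlen
    | [p0, p1] => rw [hsp] at hlen; simp at hlen
    | p0 :: p1 :: p2 :: rest =>
      rw [hsp] at hm hrecomp
      simp only [List.map_cons, List.getD_cons_zero, List.getD_cons_succ] at hm
      have hm' : (String.ofList p0 ++ "_" ++ String.ofList p1).toList = p0 ++ '_' :: p1 := by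
        simp
      have hl : name.toList = (p0 ++ '_' :: p1) ++ '_' :: pvUnsplit (p2 :: rest) := by
        rw [← hrecomp]; simp [pvUnsplit]
      rcases mem_pvTwoWord _ hm with h | h | h | h <;>
        rw [h] at hm' <;>
        [ exact absurd (startswith_intro name "coverage_gap_" _ (by rw [hl, ← hm']; rfl)) (by simpa using hcov);
          exact absurd (startswith_intro name "class_rarity_" _ (by rw [hl, ← hm']; rfl)) (by simpa using hcls);
          exact absurd (startswith_intro name "teacher_student_" _ (by rw [hl, ← hm']; rfl)) (by simpa using hts);
          exact absurd (startswith_intro name "cross_view_" _ (by rw [hl, ← hm']; rfl)) (by simpa using hcv)]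
  · rintro ⟨hlen, hm⟩
    match hsp : pvSplitU name.toList with
    | [] => exact pvSplitU_ne_nil _ hsp
    | [p0] => rw [hsp] at hlen; simp at hlen
    | p0 :: p1 :: rest =>
      rw [hsp] at hm hrecomp
      simp only [List.map_cons, List.getD_cons_zero] at hm
      have hl : name.toList = p0 ++ '_' :: pvUnsplit (p1 :: rest) := by
        rw [← hrecomp]; simp [pvUnsplit]
      rcases mem_pvOneWord _ hm with h | h | h <;>
        (have hp0 := congrArg String.toList h; rw [String.toList_ofList] at hp0; subst hp0) <;>
        [ exact absurd (startswith_intro name "semantic_" _ (by rw [hl]; rfl)) (by simpa using hsem);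
          exact absurd (startswith_intro name "geometry_" _ (by rw [hl]; rfl)) (by simpa using hgeo);
          exact absurd (startswith_intro name "confident_" _ (by rw [hl]; rfl)) (by simpa using hconf)]

-- the two loop bodies agree on EVERY name
lemma step_eq (bundles : PySem.Set String) (name : String) :
    pvStepA bundles name = pvStepB bundles name := by
  by_cases h1 : name = "latent_query_count"
  · subst h1; rfl
  by_cases h2 : name = "supported_latent_count"
  · subst h2; rfl
  have e1 : (name == "latent_query_count") = false := beq_eq_false_iff_ne.mpr h1
  have e2 : (name == "supported_latent_count") = false := beq_eq_false_iff_ne.mpr h2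
  by_cases hcov : PySem.Str.startswith name "coverage_gap_" = true
  · obtain ⟨t, ht⟩ := startswith_elim name _ hcov
    rw [stepB_two bundles name "coverage" "gap" "coverage_gap" h1 h2 (by decide) (by decide)
      (by decide) (by decide) (by decide) t ht]
    clear ht
    simp only [pvStepA]
    simp_all
  by_cases hcls : PySem.Str.startswith name "class_rarity_" = true
  · obtain ⟨t, ht⟩ := startswith_elim name _ hcls
    rw [stepB_two bundles name "class" "rarity" "class_rarity" h1 h2 (by decide) (by decide)
      (by decide) (by decide) (by decide) t ht]
    clear ht
    simp only [pvStepA]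
    simp_all
  by_cases hts : PySem.Str.startswith name "teacher_student_" = true
  · obtain ⟨t, ht⟩ := startswith_elim name _ hts
    rw [stepB_two bundles name "teacher" "student" "teacher_student" h1 h2 (by decide) (by decide)
      (by decide) (by decide) (by decide) t ht]
    clear ht
    by_cases htsd : PySem.Str.startswith name "teacher_student_disagreement_" = true
    · simp_all [pvStepA]
    · unfold pvStepA
      rw [if_neg (by simp_all), if_neg (by simp_all), if_neg (by simp_all),
        if_neg (by simp_all), if_pos (by simp_all)]
  have htsd : ¬ PySem.Str.startswith name "teacher_student_disagreement_" = true := by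
    intro h; exact hts (startswith_trans h (by decide))
  by_cases hsem : PySem.Str.startswith name "semantic_" = true
  · obtain ⟨t, ht⟩ := startswith_elim name _ hsem
    rw [stepB_one bundles name "semantic" h1 h2 (by decide) (by decide) t ht]
    clear ht
    simp only [pvStepA]
    simp_all
  have hsa : ¬ PySem.Str.startswith name "semantic_ambiguity_" = true := by
    intro h; exact hsem (startswith_trans h (by decide))
  by_cases hgeo : PySem.Str.startswith name "geometry_" = true
  · obtain ⟨t, ht⟩ := startswith_elim name _ hgeo
    rw [stepB_one bundles name "geometry" h1 h2 (by decide) (by decide) t ht]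
    clear ht
    simp only [pvStepA]
    simp_all
  have hgi : ¬ PySem.Str.startswith name "geometry_instability_" = true := by
    intro h; exact hgeo (startswith_trans h (by decide))
  by_cases hcv : PySem.Str.startswith name "cross_view_" = true
  · obtain ⟨t, ht⟩ := startswith_elim name _ hcv
    rw [stepB_two bundles name "cross" "view" "cross_view" h1 h2 (by decide) (by decide)
      (by decide) (by decide) (by decide) t ht]
    clear ht
    simp only [pvStepA]
    simp_all
  have hcvi : ¬ PySem.Str.startswith name "cross_view_inconsistency_" = true := by
    intro h; exact hcv (startswith_trans h (by decide))
  by_cases hconf : PySem.Str.startswith name "confident_" = true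
  · obtain ⟨t, ht⟩ := startswith_elim name _ hconf
    rw [stepB_one bundles name "confident" h1 h2 (by decide) (by decide) t ht]
    clear ht
    simp only [pvStepA]
    simp_all
  rw [stepB_none bundles name h1 h2 (by simpa using hcov) (by simpa using hcls)
    (by simpa using hts) (by simpa using hsem) (by simpa using hgeo) (by simpa using hcv)
    (by simpa using hconf)]
  simp only [pvStepA]
  simp_all

-- ===== VERDICT (by name: the statement is the Claim_ definition above) =====
theorem required_feature_bundles_py_spec : Claim_equal_required_feature_bundles_py := by
  intro signal_names _ _
  unfold Spec_required_feature_bundles_py required_feature_bundles_py required_feature_bundles_py_alt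
  rw [funext fun b => funext fun a => step_eq b a]
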